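-- pv_equiv track=rewrite | github.com/pypi-data/pypi-mirror-373 | packages/aiamplitudes-common-public/aiamplitudes_common_public-1.2.1-py3-none-any.whl/aiamplitudes_common_public/rels_utils.py | is_trivial0
-- ===== SOURCE A (Python) =====
-- from itertools import permutations
--
-- alphabet = ['a', 'b', 'c', 'd', 'e', 'f']
--
-- def dropdups(dicts):
--     return [dict(t) for t in {frozenset(d.items()) for d in dicts}]
--
-- dihedral_table = [list(permutations(alphabet[:3]))[i]+list(permutations(alphabet[3:]))[i]
--                   for i in range(len(alphabet))]
--
-- first_entry_rel_table = [{'d': 1}, {'e': 1}, {'f': 1}]  # Sec 3.1 (iv)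
--
-- double_adjacency_rel_table = [{'de': 1}, {'ad': 1}, {'da': 1}]  # eq 2.19, 2.20
--
-- final_entries_rel_table = [{'a': 1}, {'b': 1}, {'c': 1},  # eq 4.6 (idx: 0-2)
--                            {'ad': 1}, {'ed': 1},  # eq 4.7 (1) (idx: 3-4)
--                            {'add': 1}, {'abd': 1}, {'ace': 1}, {'ebd': 1}, {'edd': 1},  # eq 4.9 (idx: 5-9)
--                            {'addd': 1}, {'abbd': 1}, {'adbd': 1}, {'cbbd': 1},  # eq 4.10 (idx: 10-13)
--                            {'ebbd': 1}, {'ebdd': 1}, {'edbd': 1}, {'eddd': 1}, {'fdbd': 1},  # eq 4.11 (idx: 14-18)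
--
--                            {'bf': 1, 'bd': -1},  # eq 4.7 (2) (idx: 19)
--                            {'cdd': 1, 'cee': 1},  # eq 4.8 (1) (idx: 20)
--                            {'ddbd': 1, 'dbdd': -1},  # eq 4.12 (idx: 21)
--                            {'cbdd': 1, 'cdbd': -1},  # eq 4.15(1) (idx: 22)
--                            {'fbd': 1, 'dbd': -1, 'bdd': 1},  # eq 4.8 (2) (idx: 23)
--                            {'bddd': 1, 'faff': 1, 'dbdd': -1, 'eaff': -1, 'fbdd': 1, 'aeee': -1},  # eq 4.13 (idx: 24)
--                            {'abdd': 1, 'cddd': -1 / 2, 'dcee': -1 / 2, 'aeee': 1 / 2, 'eaff': 1 / 2, 'faff': -1 / 2,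
--                             'ecee': 1 / 2},  # eq 4.14 (idx: 25)
--                            {'cbdd': 1, 'bfff': -1 / 2, 'dcee': 1 / 2, 'ecee': -1 / 2, 'cddd': 1 / 2, 'dbdd': 1 / 2,
--                             'fbdd': -1 / 2},  # eq 4.15(2) (idx: 26)
--                            {'cdbd': 1, 'bfff': -1 / 2, 'dcee': 1 / 2, 'ecee': -1 / 2, 'cddd': 1 / 2, 'dbdd': 1 / 2,
--                             'fbdd': -1 / 2},  # eq 4.15(3) (idx: 27)
--                            {'fbbd': 1, 'dbbd': -1, 'bbdd': 1, 'faff': -1 / 2, 'dbdd': 1 / 2, 'fbdd': -1 / 2,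
--                             'eaff': 1 / 2, 'aeee': 1 / 2, 'bfff': -1 / 2}]  # eq 4.16 (idx: 28)
--
-- def get_dihedral_images(word):
--     '''
--     Get all the dihedral images of a given word.
--     ---------
--     INPUTS:
--     word: str.
--
--     OUTPUTS:
--     dihedral_images: list; each item in the list is a word (str); always has six items.
--     '''
--     word_idx = [alphabet.index(l) for l in [*word]]
--     dihedral_images = [''.join([dihedral_table[row][idx] for idx in word_idx]) for row in range(len(alphabet))]
--     return dihedral_images
--
-- def is_trivial0(word):
--     '''
--     Check if a given word (assuming valid and in full format) is a trivial zero word.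
--     ---------
--     INPUTS:
--     word: str.
--     OUTPUTS:
--     True/False: bool.
--     '''
--     for rel in first_entry_rel_table:  # prefix rule
--         if word[0] in rel:
--             return True
--
--     for rel in final_entries_rel_table[:3]:  # suffix rule
--         if word[-1] in rel:
--             return True
--
--     for rel in get_rel_table_dihedral(double_adjacency_rel_table):  # adjacency rule
--         for rel_key in rel:
--             if rel_key in word:
--                 return True
--
--     return False
--
-- def get_rel_table_dihedral(rel_table):
--     '''
--     Given a relation table, output all the dihedral images of each relation,
--     where duplicated relations are removed.
--     ---------
--     INPUTS:
--     rel_table: list of dicts; e.g., one specific linear relations look-up table.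
--
--     OUTPUTS:
--     unique_rel_table_dihedral: list of dicts; each item in the list is a dict corresponding to the dihedral images of one relation in the table;
--                         total length of the list: nterms of the original table * 6 - duplicated terms.
--     '''
--     rel_table_dihedral = []
--     unique_rel_table_dihedral = []
--     for rel in rel_table:
--         nterm = len(rel)  # number of terms in the relation
--         term_list = list(rel.keys())
--
--         term_list_dihedral = [get_dihedral_images(term) for term in term_list]
--         for i in range(len(term_list_dihedral[0])):
--             rel_dihedral = {}
--             for iterm in range(nterm):
--                 rel_dihedral.update({term_list_dihedral[iterm][i]: rel[term_list[iterm]]})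
--
--             rel_table_dihedral.append(rel_dihedral)
--
--     return dropdups(rel_table_dihedral)
-- ===== SOURCE B (Python) =====
-- # Forbidden bigrams: the dihedral images of the double-adjacency patterns 'de', 'ad', 'da'
-- # (all dihedral images have length 2), precomputed once at module level.
-- _FORBIDDEN = frozenset(['ad', 'be', 'cf', 'da', 'de', 'df', 'eb', 'ed', 'ef', 'fc', 'fd', 'fe'])
--
-- def is_trivial0(word):
--     if word[0] in 'def':      # prefix rule
--         return True
--     if word[-1] in 'abc':     # suffix rule
--         return True
--     # adjacency rule: scan the word's consecutive character pairs once
--     return any(a + b in _FORBIDDEN for a, b in zip(word, word[1:]))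
-- ===== Notes on version B (the rewrite author's own statement) =====
-- stated objective: simpler
-- what changed: Instead of rebuilding the dihedral-image relation table on every call and searching each of its 12 patterns as a substring of the word, B precomputes the 12 forbidden bigrams once at module level and makes a single pass over the word's consecutive character pairs, testing set membership.
import Mathlib
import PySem

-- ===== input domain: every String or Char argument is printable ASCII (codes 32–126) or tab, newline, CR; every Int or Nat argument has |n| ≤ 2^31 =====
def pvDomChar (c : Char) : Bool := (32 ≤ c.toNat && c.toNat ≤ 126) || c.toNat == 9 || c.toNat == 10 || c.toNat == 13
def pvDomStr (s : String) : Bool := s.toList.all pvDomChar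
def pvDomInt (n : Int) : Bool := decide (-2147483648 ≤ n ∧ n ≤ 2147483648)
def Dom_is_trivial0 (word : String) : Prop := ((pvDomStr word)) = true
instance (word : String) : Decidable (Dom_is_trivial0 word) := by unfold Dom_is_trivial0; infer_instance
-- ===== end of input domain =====

set_option maxRecDepth 8192
set_option maxHeartbeats 1600000


-- B (simpler): instead of rebuilding the dihedral relation table per call and running 12 substring
-- searches, it keeps a module-level forbidden-bigram set and scans the word's adjacent pairs once.

-- ===== PORT A =====
def alphabet : List Char := ['a', 'b', 'c', 'd', 'e', 'f']

-- module-level constant: [list(permutations('abc'))[i] + list(permutations('def'))[i] for i in range(6)],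
-- written out with CPython's permutation order
def dihedral_table : List (List Char) :=
  [['a','b','c','d','e','f'], ['a','c','b','d','f','e'], ['b','a','c','e','d','f'],
   ['b','c','a','e','f','d'], ['c','a','b','f','d','e'], ['c','b','a','f','e','d']]

-- dicts str -> int; keys as List Char (only the integer-valued tables reach is_trivial0)
def first_entry_rel_table : List (PySem.Dict (List Char) Int) :=
  [PySem.Dict.mk [(['d'], 1)], PySem.Dict.mk [(['e'], 1)], PySem.Dict.mk [(['f'], 1)]]

def double_adjacency_rel_table : List (PySem.Dict (List Char) Int) :=
  [PySem.Dict.mk [(['d','e'], 1)], PySem.Dict.mk [(['a','d'], 1)], PySem.Dict.mk [(['d','a'], 1)]]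

-- only the first 3 entries (the float-valued tail of the Python table never reaches is_trivial0's [:3])
def final_entries_rel_table : List (PySem.Dict (List Char) Int) :=
  [PySem.Dict.mk [(['a'], 1)], PySem.Dict.mk [(['b'], 1)], PySem.Dict.mk [(['c'], 1)]]

def get_dihedral_images (word : List Char) : List (List Char) :=
  -- alphabet.index(l): ValueError is impossible on the inputs this helper receives inside is_trivial0
  let word_idx := word.map (fun l => ((PySem.List.index? alphabet l).getD 0 : Int))
  (PySem.List.pyRange 0 6 1).map (fun row =>
    word_idx.map (fun idx => PySem.List.pyGetD (PySem.List.pyGetD dihedral_table row []) idx ' '))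

-- Python dedups via a set of frozensets (unordered); is_trivial0 only asks whether ANY key of ANY
-- dict matches, so the order is immaterial; ported as first-occurrence dedup.
def dropdups (dicts : List (PySem.Dict (List Char) Int)) : List (PySem.Dict (List Char) Int) :=
  PySem.List.dedup dicts

def get_rel_table_dihedral (rel_table : List (PySem.Dict (List Char) Int)) :
    List (PySem.Dict (List Char) Int) :=
  let rel_table_dihedral := rel_table.foldl (fun acc rel =>
    let term_list := rel.keys
    let term_list_dihedral := term_list.map get_dihedral_images
    acc ++ (List.range (term_list_dihedral.getD 0 []).length).map (fun i =>
      (List.range term_list.length).foldl (fun d iterm =>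
        PySem.Dict.insert d ((term_list_dihedral.getD iterm []).getD i [])
          ((PySem.Dict.get? rel (term_list.getD iterm [])).getD 0)) PySem.Dict.empty)) []
  dropdups rel_table_dihedral

def is_trivial0 (word : String) : Bool :=
  match PySem.Str.pyGet? word 0, PySem.Str.pyGet? word (-1) with
  | some c0, some cend =>
    if first_entry_rel_table.any (fun rel => (PySem.Dict.get? rel [c0]).isSome) then true
    else if (final_entries_rel_table.take 3).any (fun rel => (PySem.Dict.get? rel [cend]).isSome) then true
    else if (get_rel_table_dihedral double_adjacency_rel_table).any
        (fun rel => rel.keys.any (fun k => PySem.Chars.isIn k word.toList)) then true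
    else false
  | _, _ => false  -- Python raises IndexError here (word[0] / word[-1] on ""); excluded by Pre_

-- ===== PORT B =====
-- the module-level frozenset of Source B
def forbidden_bigrams : List (List Char) :=
  [['a','d'], ['b','e'], ['c','f'], ['d','a'], ['d','e'], ['d','f'],
   ['e','b'], ['e','d'], ['e','f'], ['f','c'], ['f','d'], ['f','e']]

def is_trivial0_alt (word : String) : Bool :=
  match PySem.Str.pyGet? word 0 with
  | none => false  -- Python raises IndexError here (word[0] on ""); excluded by Pre_
  | some c0 =>
    match PySem.Str.pyGet? word (-1) with
    | none => false
    | some cend =>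
      if c0 == 'd' || c0 == 'e' || c0 == 'f' then true          -- word[0] in 'def'
      else if cend == 'a' || cend == 'b' || cend == 'c' then true  -- word[-1] in 'abc'
      else
        (word.toList.zip word.toList.tail).any
          (fun p => forbidden_bigrams.contains [p.1, p.2])      -- zip(word, word[1:])

-- ===== PRECONDITION & SPEC =====
-- Pre_ excludes only the empty word, on which Python A raises IndexError at word[0].
def Pre_is_trivial0 (word : String) : Prop := word.toList ≠ []
instance (word : String) : Decidable (Pre_is_trivial0 word) := by unfold Pre_is_trivial0; infer_instance
def pvWitness_is_trivial0 : String := "ab"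

def Spec_is_trivial0 (word : String) (out : Bool) : Prop := out = is_trivial0_alt word
instance (word : String) (out : Bool) : Decidable (Spec_is_trivial0 word out) := by
  unfold Spec_is_trivial0; infer_instance

-- ===== CLAIM =====
def Claim_equal_is_trivial0 : Prop :=
  ∀ (word : String), Dom_is_trivial0 word → Pre_is_trivial0 word →
    Spec_is_trivial0 word (is_trivial0 word)

-- ===== LEMMAS AND PROOFS =====

-- A 2-character pattern is a substring iff some adjacent pair of the word equals it.
lemma infix_pair (x y : Char) (w : List Char) :
    ([x, y] <:+: w) ↔ (w.zip w.tail).any (fun p => p.1 == x && p.2 == y) = true := by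
  induction w with
  | nil =>
    constructor
    · intro h; have := h.length_le
      simp only [List.length_cons, List.length_nil] at this; omega
    · intro h
      simp only [List.zip_nil_left, List.any_nil] at h
      exact (Bool.false_ne_true h).elim
  | cons a t ih =>
    cases t with
    | nil =>
      constructor
      · intro h; have := h.length_le
        simp only [List.length_cons, List.length_nil] at this; omega
      · intro h
        simp only [List.tail_cons, List.zip_nil_right, List.any_nil] at h
        exact (Bool.false_ne_true h).elim
    | cons b u =>
      rw [List.infix_cons_iff, ih]
      simp only [List.tail_cons, List.zip_cons_cons, List.any_cons, Bool.or_eq_true,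
        Bool.and_eq_true, beq_iff_eq, List.cons_prefix_cons, List.nil_prefix, and_true]
      constructor
      · rintro (⟨h1, h2⟩ | h)
        · exact Or.inl ⟨h1.symm, h2.symm⟩
        · exact Or.inr h
      · rintro (⟨h1, h2⟩ | h)
        · exact Or.inl ⟨h1.symm, h2.symm⟩
        · exact Or.inr h

lemma isIn_pair (x y : Char) (w : List Char) :
    PySem.Chars.isIn [x, y] w
      = (w.zip w.tail).any (fun p => p.1 == x && p.2 == y) := by
  rw [Bool.eq_iff_iff, PySem.Chars.isIn_iff_infix]
  exact infix_pair x y w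

-- the concrete dihedral relation table A rebuilds on each call
lemma relTable_eval :
    get_rel_table_dihedral double_adjacency_rel_table =
      [PySem.Dict.mk [(['d','e'], 1)], PySem.Dict.mk [(['d','f'], 1)],
       PySem.Dict.mk [(['e','d'], 1)], PySem.Dict.mk [(['e','f'], 1)],
       PySem.Dict.mk [(['f','d'], 1)], PySem.Dict.mk [(['f','e'], 1)],
       PySem.Dict.mk [(['a','d'], 1)], PySem.Dict.mk [(['b','e'], 1)],
       PySem.Dict.mk [(['c','f'], 1)], PySem.Dict.mk [(['d','a'], 1)],
       PySem.Dict.mk [(['e','b'], 1)], PySem.Dict.mk [(['f','c'], 1)]] := by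
  decide

-- A's prefix loop is the three-letter test
lemma prefix_eq (c0 : Char) :
    first_entry_rel_table.any (fun rel => (PySem.Dict.get? rel [c0]).isSome)
      = (c0 == 'd' || c0 == 'e' || c0 == 'f') := by
  rw [Bool.eq_iff_iff]
  simp [first_entry_rel_table, PySem.Dict.get?]
  tauto

-- A's suffix loop is the three-letter test
lemma suffix_eq (cend : Char) :
    (final_entries_rel_table.take 3).any (fun rel => (PySem.Dict.get? rel [cend]).isSome)
      = (cend == 'a' || cend == 'b' || cend == 'c') := by
  rw [Bool.eq_iff_iff]
  simp [final_entries_rel_table, PySem.Dict.get?]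
  tauto

lemma pair_beq (a b x y : Char) : (([a, b] : List Char) == [x, y]) = (a == x && b == y) := by
  rw [Bool.eq_iff_iff]
  simp

lemma any_or {α : Type} (l : List α) (p q : α → Bool) :
    (l.any fun x => p x || q x) = (l.any p || l.any q) := by
  induction l with
  | nil => rfl
  | cons a t ih => simp [List.any_cons, ih, Bool.or_assoc, Bool.or_left_comm]

-- A's substring scan over the rebuilt table equals B's single adjacent-pair scan
lemma adj_eq (w : List Char) :
    (get_rel_table_dihedral double_adjacency_rel_table).any
        (fun rel => rel.keys.any (fun k => PySem.Chars.isIn k w))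
      = (w.zip w.tail).any (fun p => forbidden_bigrams.contains [p.1, p.2]) := by
  simp only [relTable_eval, List.any_cons, List.any_nil, PySem.Dict.keys_mk, List.map,
    isIn_pair, Bool.or_false, forbidden_bigrams, List.contains_cons, List.contains_nil,
    pair_beq, any_or]
  ac_rfl

-- ===== VERDICT =====
theorem is_trivial0_spec : Claim_equal_is_trivial0 := by
  intro word _ _
  unfold Spec_is_trivial0 is_trivial0 is_trivial0_alt
  cases h0 : PySem.Str.pyGet? word 0 with
  | none => cases h1 : PySem.Str.pyGet? word (-1) <;> rfl
  | some c0 =>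
    cases h1 : PySem.Str.pyGet? word (-1) with
    | none => rfl
    | some cend =>
      simp only [prefix_eq, suffix_eq, adj_eq, Bool.if_false_right, Bool.decide_eq_true,
        Bool.and_true]
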